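-- pv_equiv track=rewrite | github.com/LunaSparklecaster/Tetrimorecloned | game_area.py | rotate_offsets
-- ===== SOURCE A (Python) =====
-- def rotate_offsets(offsets, rotation):
--     if rotation == 1:
--         for i in range(len(offsets)):
--             offsets[i][0], offsets[i][1] = 0 - offsets[i][1], offsets[i][0]
--     if rotation == 2:
--         for i in range(len(offsets)):
--             offsets[i][0], offsets[i][1] = 0 - offsets[i][0], 0 - offsets[i][1]
--     if rotation == 3:
--         for i in range(len(offsets)):
--             offsets[i][0], offsets[i][1] = offsets[i][1], 0 - offsets[i][0]
--     return offsets
-- ===== SOURCE B (Python) =====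
-- def rotate_offsets(offsets, rotation):
--     n = {1: 1, 2: 2, 3: 3}.get(rotation, 0)
--     for _ in range(n):
--         for off in offsets:
--             off[0], off[1] = -off[1], off[0]
--     return offsets
-- ===== Notes on version B (the rewrite author's own statement) =====
-- stated objective: simpler
-- what changed: B replaces A's three separate closed-form rotation cases with a repeat count looked up by exact equality and an outer loop applying the single 90-degree primitive that many times.
import Mathlib
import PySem

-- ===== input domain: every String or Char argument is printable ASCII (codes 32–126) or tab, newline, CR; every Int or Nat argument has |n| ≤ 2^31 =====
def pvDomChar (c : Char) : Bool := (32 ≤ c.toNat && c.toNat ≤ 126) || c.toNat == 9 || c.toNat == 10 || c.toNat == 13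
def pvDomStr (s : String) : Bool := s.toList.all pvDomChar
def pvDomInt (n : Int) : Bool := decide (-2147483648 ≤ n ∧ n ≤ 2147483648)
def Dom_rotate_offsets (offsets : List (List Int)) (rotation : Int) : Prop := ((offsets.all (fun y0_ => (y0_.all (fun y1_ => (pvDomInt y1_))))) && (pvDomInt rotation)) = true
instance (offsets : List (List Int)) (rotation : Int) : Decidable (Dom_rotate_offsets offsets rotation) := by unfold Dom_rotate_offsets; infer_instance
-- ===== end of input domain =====

-- B mutates the offsets lists in place exactly as A does; the equivalence proved here is about the returned value.
-- B: repeat count by exact-equality lookup, then repeated application of the single 90° primitive (objective: simpler).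

-- ===== PORT A =====
-- one row under A's rotation-1 / 2 / 3 update (rows of length < 2 are excluded by Pre_: Python raises IndexError there)
def rowA1 : List Int → List Int
  | a :: b :: rest => (0 - b) :: a :: rest
  | row => row

def rowA2 : List Int → List Int
  | a :: b :: rest => (0 - a) :: (0 - b) :: rest
  | row => row

def rowA3 : List Int → List Int
  | a :: b :: rest => b :: (0 - a) :: rest
  | row => row

def rotate_offsets (offsets : List (List Int)) (rotation : Int) : List (List Int) :=
  let o1 := if rotation = 1 then o1_loop offsets else offsets
  let o2 := if rotation = 2 then o2_loop o1 else o1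
  if rotation = 3 then o3_loop o2 else o2
where
  o1_loop (l : List (List Int)) : List (List Int) := l.map rowA1
  o2_loop (l : List (List Int)) : List (List Int) := l.map rowA2
  o3_loop (l : List (List Int)) : List (List Int) := l.map rowA3

-- ===== PORT B =====
-- the single 90° primitive: off[0], off[1] = -off[1], off[0]
def rowB : List Int → List Int
  | a :: b :: rest => (-b) :: a :: rest
  | row => row

def rotate_offsets_alt (offsets : List (List Int)) (rotation : Int) : List (List Int) :=
  let n : Nat := if rotation = 1 then 1 else if rotation = 2 then 2 else if rotation = 3 then 3 else 0
  Nat.rec offsets (fun _ acc => acc.map rowB) n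

-- ===== PRECONDITION & SPEC =====
-- Pre_ excludes exactly the inputs where Python A raises IndexError: a rotation in {1,2,3} with some row shorter than 2.
def Pre_rotate_offsets (offsets : List (List Int)) (rotation : Int) : Prop :=
  (rotation = 1 ∨ rotation = 2 ∨ rotation = 3) → ∀ row ∈ offsets, 2 ≤ row.length
instance (offsets : List (List Int)) (rotation : Int) : Decidable (Pre_rotate_offsets offsets rotation) := by unfold Pre_rotate_offsets; infer_instance
def pvWitness_rotate_offsets : List (List Int) × Int := ([[1, 2], [0, -3]], 2)

def Spec_rotate_offsets (offsets : List (List Int)) (rotation : Int) (out : List (List Int)) : Prop := out = rotate_offsets_alt offsets rotation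
instance (offsets : List (List Int)) (rotation : Int) (out : List (List Int)) : Decidable (Spec_rotate_offsets offsets rotation out) := by unfold Spec_rotate_offsets; infer_instance

-- ===== CLAIM (what is proved, stated in full; the proofs are below) =====
def Claim_equal_rotate_offsets : Prop := ∀ (offsets : List (List Int)) (rotation : Int), Dom_rotate_offsets offsets rotation → Pre_rotate_offsets offsets rotation → Spec_rotate_offsets offsets rotation (rotate_offsets offsets rotation)

-- ===== LEMMAS AND PROOFS =====
theorem rowB_eq_rowA1 (row : List Int) : rowB row = rowA1 row := by
  cases row with
  | nil => rfl
  | cons a t => cases t with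
    | nil => rfl
    | cons b r => simp [rowB, rowA1]

theorem rowB_sq_eq_rowA2 (row : List Int) (h : 2 ≤ row.length) : rowB (rowB row) = rowA2 row := by
  match row, h with
  | a :: b :: r, _ => simp [rowB, rowA2]

theorem rowB_cube_eq_rowA3 (row : List Int) (h : 2 ≤ row.length) : rowB (rowB (rowB row)) = rowA3 row := by
  match row, h with
  | a :: b :: r, _ => simp [rowB, rowA3]

-- ===== VERDICT =====
theorem rotate_offsets_spec : Claim_equal_rotate_offsets := by
  intro offsets rotation _ hpre
  unfold Spec_rotate_offsets rotate_offsets rotate_offsets_alt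
    rotate_offsets.o1_loop rotate_offsets.o2_loop rotate_offsets.o3_loop
  by_cases h1 : rotation = 1
  · subst h1
    simp [List.map_congr_left (fun row _ => (rowB_eq_rowA1 row).symm)]
  · by_cases h2 : rotation = 2
    · subst h2
      norm_num
      show List.map rowA2 offsets = List.map rowB (List.map rowB offsets)
      rw [List.map_map]
      exact List.map_congr_left (fun row hr =>
        (rowB_sq_eq_rowA2 row (hpre (Or.inr (Or.inl rfl)) row hr)).symm)
    · by_cases h3 : rotation = 3
      · subst h3
        norm_num
        show List.map rowA3 offsets = List.map rowB (List.map rowB (List.map rowB offsets))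
        rw [List.map_map, List.map_map]
        exact List.map_congr_left (fun row hr =>
          (rowB_cube_eq_rowA3 row (hpre (Or.inr (Or.inr rfl)) row hr)).symm)
      · simp [h1, h2, h3]
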